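-- pv_equiv track=rewrite | github.com/bglw/aoc | '22/8/8pt2.py | count_visible
-- ===== SOURCE A (Python) =====
-- def count_visible(row, init=-1):
--     cap, trees = init, []
--     for i in range(len(row)):
--         tree = int(row[i])
--         if tree < cap:
--             trees.append(i)
--         else:
--             trees.append(i)
--             return trees
--     return trees
-- ===== SOURCE B (Python) =====
-- def count_visible(row, init=-1):
--     # Right-to-left pass: maintain the answer for the current suffix, kept in
--     # reversed order (a blocking tree resets it to just itself; a shorter tree
--     # is appended); one final reversal yields the answer.
--     res = []
--     for i in range(len(row) - 1, -1, -1):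
--         if int(row[i]) >= init:
--             res = [i]
--         else:
--             res.append(i)
--     return res[::-1]
-- ===== Notes on version B (the rewrite author's own statement) =====
-- stated objective: alternative
-- what changed: A scans left-to-right accumulating indices with an early return at the first blocking tree; B scans right-to-left maintaining the current suffix's answer in reversed order (reset to [i] at a blocking tree, append i otherwise) and reverses it once at the end, a different traversal order and maintained state.
import Mathlib
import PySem

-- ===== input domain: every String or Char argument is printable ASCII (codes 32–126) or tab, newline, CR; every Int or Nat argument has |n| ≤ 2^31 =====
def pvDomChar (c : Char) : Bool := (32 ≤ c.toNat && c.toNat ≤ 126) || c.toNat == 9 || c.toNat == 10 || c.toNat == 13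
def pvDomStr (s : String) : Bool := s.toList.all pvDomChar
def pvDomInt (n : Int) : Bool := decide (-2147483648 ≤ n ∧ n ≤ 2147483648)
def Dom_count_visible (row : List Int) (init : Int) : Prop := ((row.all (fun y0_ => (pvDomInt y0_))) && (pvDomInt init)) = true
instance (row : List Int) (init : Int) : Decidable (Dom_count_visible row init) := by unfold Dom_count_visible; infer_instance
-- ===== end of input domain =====

-- B replaces A's left-to-right accumulator loop (with early return) by a right-to-left
-- pass maintaining the answer for the current suffix (objective: alternative).


-- ===== PORT A =====
-- loop 'for i in range(len(row))' with early return, carrying the accumulator 'trees'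
def count_visible_go (row : List Int) (cap : Int) (i : Nat) (trees : List Int) : List Int :=
  if h : i < row.length then
    let tree := row[i]
    if tree < cap then count_visible_go row cap (i + 1) (trees ++ [(i : Int)])
    else trees ++ [(i : Int)]
  else trees
termination_by row.length - i

def count_visible (row : List Int) (init : Int) : List Int :=
  count_visible_go row init 0 []

-- ===== PORT B =====
-- loop 'for i in range(len(row) - 1, -1, -1)' carrying 'res'; 'res[::-1]' at the end is
-- PySem.List.slice? … none none (-1), which is always 'some' since the step -1 ≠ 0
def count_visible_alt (row : List Int) (init : Int) : List Int :=
  (PySem.List.slice?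
    ((PySem.List.pyRange ((row.length : Int) - 1) (-1) (-1)).foldl
      (fun res i =>
        if init ≤ PySem.List.pyGetD row i 0 then [i]
        else res ++ [i]) [])
    none none (-1)).getD []

-- ===== PRECONDITION & SPEC =====
def Spec_count_visible (row : List Int) (init : Int) (out : List Int) : Prop := out = count_visible_alt row init
instance (row : List Int) (init : Int) (out : List Int) : Decidable (Spec_count_visible row init out) := by unfold Spec_count_visible; infer_instance

-- ===== CLAIM (what is proved, stated in full; the proofs are below) =====
def Claim_equal_count_visible : Prop := ∀ (row : List Int) (init : Int), Dom_count_visible row init → Spec_count_visible row init (count_visible row init)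

-- ===== LEMMAS AND PROOFS =====

-- A's loop from position i equals B's step function folded (right to left) over the indices i..len-1
theorem count_visible_go_eq (row : List Int) (cap : Int) :
    ∀ (n i : Nat) (acc : List Int), row.length - i = n → i ≤ row.length →
    count_visible_go row cap i acc =
      acc ++ (PySem.List.pyRange (i : Int) (row.length : Int) 1).foldr
        (fun j res =>
          if cap ≤ PySem.List.pyGetD row j 0 then [j]
          else j :: res) [] := by
  intro n
  induction n with
  | zero =>
    intro i acc hn hle
    have hi : i = row.length := by omega
    subst hi
    rw [count_visible_go, PySem.List.pyRange_one_eq_nil (by omega)]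
    simp
  | succ n ih =>
    intro i acc hn hle
    have h : i < row.length := by omega
    rw [count_visible_go]
    simp only [h, dif_pos]
    rw [PySem.List.pyRange_one_cons (by exact_mod_cast h), List.foldr_cons]
    have hget : PySem.List.pyGetD row (i : Int) 0 = row[i] := by
      rw [PySem.List.pyGetD_natCast]
      exact List.getD_eq_getElem row 0 h
    by_cases hc : row[i] < cap
    · have hnle : ¬ cap ≤ PySem.List.pyGetD row (i : Int) 0 := by rw [hget]; omega
      rw [if_pos hc, if_neg hnle]
      have hcast : ((i : Int) + 1) = ((i + 1 : Nat) : Int) := by push_cast; ring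
      rw [hcast, ih (i + 1) (acc ++ [(i : Int)]) (by omega) (by omega), List.append_assoc]
      rfl
    · have hle' : cap ≤ PySem.List.pyGetD row (i : Int) 0 := by rw [hget]; omega
      rw [if_neg hc, if_pos hle']

-- reversing B's append-accumulator fold turns it into the prepend-accumulator fold
theorem reverse_foldl_append (c : Int → Prop) [DecidablePred c] :
    ∀ (l : List Int) (s : List Int),
    (l.foldl (fun res i => if c i then [i] else res ++ [i]) s).reverse =
      l.foldl (fun res i => if c i then [i] else i :: res) s.reverse := by
  intro l
  induction l with
  | nil => intro s; rfl
  | cons x t ih =>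
    intro s
    simp only [List.foldl_cons]
    by_cases hx : c x
    · simp [hx, ih]
    · simp only [hx, reduceIte]
      rw [ih]
      simp

-- ===== VERDICT (by name: the statement is the Claim_ definition above) =====
theorem count_visible_spec : Claim_equal_count_visible := by
  unfold Claim_equal_count_visible
  intro row init _
  unfold Spec_count_visible count_visible count_visible_alt
  rw [count_visible_go_eq row init row.length 0 [] (by omega) (by omega)]
  rw [PySem.List.slice?_none_none_neg_one, Option.getD_some]
  rw [reverse_foldl_append (fun i => init ≤ PySem.List.pyGetD row i 0)]
  rw [PySem.List.pyRange_neg_one_eq_reverse, List.foldl_reverse]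
  norm_num
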